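-- pv_equiv track=rewrite | github.com/oscarpineda-prgx/OCR-Engine-v1.0 | app/services/parsing/fields.py | _is_single_edit_month_match
-- ===== SOURCE A (Python) =====
-- def _is_single_edit_month_match(value: str, target: str) -> bool:
--     if abs(len(value) - len(target)) > 1:
--         return False
--
--     if value == target:
--         return True
--
--     # Fast path for same-length OCR substitutions.
--     if len(value) == len(target):
--         mismatches = sum(1 for left, right in zip(value, target) if left != right)
--         return mismatches <= 1
--
--     # Single insertion/deletion tolerance.
--     if len(value) > len(target):
--         value, target = target, value
--
--     i = j = edits = 0
--     while i < len(value) and j < len(target):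
--         if value[i] == target[j]:
--             i += 1
--             j += 1
--             continue
--         edits += 1
--         if edits > 1:
--             return False
--         j += 1
--
--     return True
-- ===== SOURCE B (Python) =====
-- def _is_single_edit_month_match(value: str, target: str) -> bool:
--     if len(value) > len(target):
--         value, target = target, value
--     if len(target) - len(value) > 1:
--         return False
--     for i in range(len(value)):
--         if value[i] != target[i]:
--             if len(value) == len(target):
--                 return value[i + 1:] == target[i + 1:]
--             return value[i:] == target[i + 1:]
--     return True
-- ===== Notes on version B (the rewrite author's own statement) =====
-- stated objective: idiomatic
-- what changed: Replaces A's two separate mechanisms (mismatch counting for equal lengths, a two-pointer edit-counting loop for length-diff-1) with the standard one-edit-distance idiom: normalize shorter-first, locate the first diverging index, then decide by a single suffix-slice comparison.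
import Mathlib
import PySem

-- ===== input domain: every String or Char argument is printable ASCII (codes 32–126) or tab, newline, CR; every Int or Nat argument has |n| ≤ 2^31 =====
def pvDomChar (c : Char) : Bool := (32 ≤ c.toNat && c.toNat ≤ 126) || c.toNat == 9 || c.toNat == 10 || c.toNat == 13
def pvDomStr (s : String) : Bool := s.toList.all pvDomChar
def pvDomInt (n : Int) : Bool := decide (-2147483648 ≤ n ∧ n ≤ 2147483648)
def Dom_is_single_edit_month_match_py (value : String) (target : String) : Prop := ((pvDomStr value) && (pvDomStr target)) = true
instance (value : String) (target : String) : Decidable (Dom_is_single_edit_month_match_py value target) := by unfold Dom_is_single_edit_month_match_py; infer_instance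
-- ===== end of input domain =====

-- B rewrites A's separate mismatch-counting and two-pointer branches as the standard
-- one-edit-distance idiom (first divergence, then one suffix comparison); same cost, more idiomatic.

-- ===== PORT A =====
-- the while loop with indices i, j: ported as recursion on the suffixes value[i:], target[j:],
-- carrying the edits counter (indices i, j correspond to the consumed prefixes)
def pvALoop : List Char → List Char → Nat → Bool
  | c :: v, d :: t, edits =>
      if c = d then pvALoop v t edits
      else if edits + 1 > 1 then false
      else pvALoop (c :: v) t (edits + 1)
  | _, _, _ => true
termination_by _ t _ => t.length

def is_single_edit_month_match_py (value : String) (target : String) : Bool :=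
  let v := value.toList
  let t := target.toList
  if ((v.length : Int) - (t.length : Int)).natAbs > 1 then false
  else if v = t then true
  else if v.length = t.length then
    -- sum(1 for left, right in zip(value, target) if left != right) <= 1
    decide (((v.zip t).countP (fun p => p.1 ≠ p.2)) ≤ 1)
  else
    let (v, t) := if v.length > t.length then (t, v) else (v, t)
    pvALoop v t 0

-- ===== PORT B =====
-- the for loop over i with suffix-slice comparisons: value[i:], target[i:] are the suffixes,
-- sameLen records whether len(value) == len(target)
def pvBLoop (sameLen : Bool) : List Char → List Char → Bool
  | c :: v, d :: t =>
      if c = d then pvBLoop sameLen v t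
      else if sameLen then v == t else (c :: v) == t
  | _, _ => true

def is_single_edit_month_match_py_alt (value : String) (target : String) : Bool :=
  let v0 := value.toList
  let t0 := target.toList
  let (v, t) := if v0.length > t0.length then (t0, v0) else (v0, t0)
  if t.length - v.length > 1 then false
  else pvBLoop (v.length == t.length) v t

-- ===== PRECONDITION & SPEC =====
def Spec_is_single_edit_month_match_py (value : String) (target : String) (out : Bool) : Prop := out = is_single_edit_month_match_py_alt value target
instance (value : String) (target : String) (out : Bool) : Decidable (Spec_is_single_edit_month_match_py value target out) := by unfold Spec_is_single_edit_month_match_py; infer_instance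

-- ===== CLAIM (what is proved, stated in full; the proofs are below) =====
def Claim_equal_is_single_edit_month_match_py : Prop := ∀ (value : String) (target : String), Dom_is_single_edit_month_match_py value target → Spec_is_single_edit_month_match_py value target (is_single_edit_month_match_py value target)

-- ===== LEMMAS AND PROOFS =====

-- B's loop on two equal lists finds no divergence
theorem pvBLoop_refl (s : Bool) (v : List Char) : pvBLoop s v v = true := by
  induction v with
  | nil => rfl
  | cons c v ih => simp [pvBLoop, ih]

-- zero mismatches in the zip of equal-length lists means the lists are equal
theorem countP_zip_eq_zero (v t : List Char) (h : v.length = t.length) :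
    ((v.zip t).countP (fun p => p.1 ≠ p.2) = 0) ↔ v = t := by
  induction v generalizing t with
  | nil => cases t with
    | nil => simp
    | cons d t => simp at h
  | cons c v ih =>
    cases t with
    | nil => simp at h
    | cons d t =>
      simp only [List.length_cons, Nat.add_right_cancel_iff] at h
      rw [List.zip_cons_cons, List.countP_cons]
      by_cases hc : c = d
      · subst hc
        simp [-List.countP_eq_zero]
        simpa [-List.countP_eq_zero] using ih t h
      · simp [-List.countP_eq_zero, hc]

-- equal-length case: B's first-divergence + suffix comparison equals A's mismatch count ≤ 1
theorem bloop_true_eq_count (v t : List Char) (h : v.length = t.length) :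
    pvBLoop true v t = decide (((v.zip t).countP (fun p => p.1 ≠ p.2)) ≤ 1) := by
  induction v generalizing t with
  | nil => cases t with
    | nil => rfl
    | cons d t => simp at h
  | cons c v ih =>
    cases t with
    | nil => simp at h
    | cons d t =>
      simp only [List.length_cons, Nat.add_right_cancel_iff] at h
      rw [List.zip_cons_cons, List.countP_cons]
      by_cases hc : c = d
      · subst hc
        rw [show pvBLoop true (c :: v) (c :: t) = pvBLoop true v t from by simp [pvBLoop]]
        rw [if_neg (by simp), Nat.add_zero]
        exact ih t h
      · rw [show pvBLoop true (c :: v) (d :: t) = (v == t) from by simp [pvBLoop, hc]]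
        rw [if_pos (by simp [hc])]
        have hz := countP_zip_eq_zero v t h
        by_cases he : v = t
        · rw [hz.mpr he] at *
          simp [he]
        · have h0 : (v.zip t).countP (fun p => p.1 ≠ p.2) ≠ 0 := fun h0 => he (hz.mp h0)
          have hgt : ¬ ((v.zip t).countP (fun p => p.1 ≠ p.2) + 1 ≤ 1) := by omega
          rw [beq_eq_false_iff_ne.mpr he, decide_eq_false hgt]

-- A's loop in the edits = 1 state on equal-length suffixes is suffix equality
theorem aloop_one (v t : List Char) (h : v.length = t.length) :
    pvALoop v t 1 = (v == t) := by
  induction v generalizing t with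
  | nil => cases t with
    | nil => simp [pvALoop]
    | cons d t => simp at h
  | cons c v ih =>
    cases t with
    | nil => simp at h
    | cons d t =>
      simp only [List.length_cons, Nat.add_right_cancel_iff] at h
      by_cases hc : c = d
      · subst hc
        simpa [pvALoop] using ih t h
      · simp [pvALoop, hc]

-- length-diff-1 case: A's two-pointer loop equals B's first-divergence + suffix comparison
theorem aloop_eq_bloop (v t : List Char) (h : t.length = v.length + 1) :
    pvALoop v t 0 = pvBLoop false v t := by
  induction v generalizing t with
  | nil => cases t with
    | nil => simp at h
    | cons d t => simp [pvALoop, pvBLoop]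
  | cons c v ih =>
    cases t with
    | nil => simp at h
    | cons d t =>
      simp only [List.length_cons, Nat.add_right_cancel_iff] at h
      by_cases hc : c = d
      · subst hc
        simpa [pvALoop, pvBLoop] using ih t h
      · have hlen : (c :: v).length = t.length := by simp [h]
        simp [pvALoop, pvBLoop, hc, aloop_one (c :: v) t hlen]

theorem main_eq (value target : String) :
    is_single_edit_month_match_py value target = is_single_edit_month_match_py_alt value target := by
  simp only [is_single_edit_month_match_py, is_single_edit_month_match_py_alt]
  generalize value.toList = v
  generalize target.toList = t
  by_cases hswap : v.length > t.length
  · -- value longer: B compares (t, v)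
    simp only [if_pos hswap]
    by_cases hgap : ((v.length : Int) - (t.length : Int)).natAbs > 1
    · have h2 : v.length - t.length > 1 := by omega
      simp [hgap, h2]
    · have heq : v ≠ t := fun he => by subst he; omega
      have hsame : v.length ≠ t.length := by omega
      have h1 : v.length = t.length + 1 := by omega
      have hg : ¬ v.length - t.length > 1 := by omega
      have hne : (t.length == v.length) = false := by simp; omega
      simp [hgap, heq, hsame, hswap, hg, hne, aloop_eq_bloop t v h1]
  · -- value not longer: B compares (v, t)
    simp only [if_neg hswap]
    by_cases hgap : ((v.length : Int) - (t.length : Int)).natAbs > 1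
    · have h2 : t.length - v.length > 1 := by omega
      simp [hgap, h2]
    · have hg : ¬ t.length - v.length > 1 := by omega
      by_cases heq : v = t
      · subst heq
        simp [pvBLoop_refl]
      · simp only [if_neg hgap, if_neg heq, if_neg hg, Bool.if_false_left]
        by_cases hsame : v.length = t.length
        · have hne : (v.length == t.length) = true := by simp [hsame]
          simp [hsame, hne, bloop_true_eq_count v t hsame]
        · have h1 : t.length = v.length + 1 := by omega
          have hne : (v.length == t.length) = false := by simp; omega
          simp [hsame, hne, aloop_eq_bloop v t h1]

-- ===== VERDICT (by name: the statement is the Claim_ definition above) =====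
theorem is_single_edit_month_match_py_spec : Claim_equal_is_single_edit_month_match_py := by
  intro value target _
  unfold Spec_is_single_edit_month_match_py
  exact main_eq value target
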